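-- pv_equiv track=rewrite | github.com/wow2658/mini-npu-simulator | main.py | get_o_filter
-- ===== SOURCE A (Python) =====
-- def get_o_filter(size):
--     """O 필터 생성 (테두리만 1)"""
--     matrix = []
--     for i in range(size):
--         row = []
--         for j in range(size):
--             if i == 0 or i == size - 1 or j == 0 or j == size - 1:
--                 row.append(1)
--             else:
--                 row.append(0)
--         matrix.append(row)
--     return matrix
-- ===== SOURCE B (Python) =====
-- def get_o_filter(size):
--     """O 필터 생성 (테두리만 1)"""
--     matrix = [[0] * size for _ in range(size)]
--     if size > 0:
--         ones = [1] * size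
--         matrix[0] = ones[:]
--         matrix[-1] = ones[:]
--         for row in matrix:
--             row[0] = 1
--             row[-1] = 1
--     return matrix
-- ===== Notes on version B (the rewrite author's own statement) =====
-- stated objective: simpler
-- what changed: B builds an all-zeros matrix first and then overwrites the border (top/bottom row assignment plus first/last element of every row) instead of A's per-cell border conditional inside nested loops.
import Mathlib
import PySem

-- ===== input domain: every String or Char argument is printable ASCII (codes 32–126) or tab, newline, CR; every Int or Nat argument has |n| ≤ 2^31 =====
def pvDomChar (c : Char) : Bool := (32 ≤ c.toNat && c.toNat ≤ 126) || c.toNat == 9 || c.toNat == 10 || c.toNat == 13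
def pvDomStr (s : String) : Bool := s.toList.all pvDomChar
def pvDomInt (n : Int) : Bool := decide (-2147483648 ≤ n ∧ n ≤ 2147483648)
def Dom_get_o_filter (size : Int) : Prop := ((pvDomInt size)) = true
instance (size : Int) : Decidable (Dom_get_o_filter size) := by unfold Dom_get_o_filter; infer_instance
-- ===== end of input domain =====

-- B builds an all-zeros matrix first and then overwrites the border in separate passes
-- (simpler decomposition, same cost), instead of A's per-cell conditional in nested loops.

-- ===== PORT A =====
def get_o_filter (size : Int) : List (List Int) :=
  (PySem.List.pyRange 0 size 1).foldl (fun matrix i =>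
    matrix ++ [(PySem.List.pyRange 0 size 1).foldl (fun row j =>
      row ++ [if i = 0 ∨ i = size - 1 ∨ j = 0 ∨ j = size - 1 then (1 : Int) else 0]) []]) []

-- ===== PORT B =====
def get_o_filter_alt (size : Int) : List (List Int) :=
  let matrix := List.replicate size.toNat (List.replicate size.toNat (0 : Int))
  if size > 0 then
    let ones := List.replicate size.toNat (1 : Int)
    let matrix := matrix.set 0 ones
    let matrix := matrix.set (matrix.length - 1) ones
    matrix.map (fun row => (row.set 0 1).set (row.length - 1) 1)
  else matrix

-- ===== PRECONDITION & SPEC =====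
def Spec_get_o_filter (size : Int) (out : List (List Int)) : Prop := out = get_o_filter_alt size
instance (size : Int) (out : List (List Int)) : Decidable (Spec_get_o_filter size out) := by unfold Spec_get_o_filter; infer_instance

-- ===== CLAIM (what is proved, stated in full; the proofs are below) =====
def Claim_equal_get_o_filter : Prop := ∀ (size : Int), Dom_get_o_filter size → Spec_get_o_filter size (get_o_filter size)

-- ===== LEMMAS AND PROOFS =====

-- A's append-accumulator loops are maps over the two ranges
theorem get_o_filter_eq_map (size : Int) :
    get_o_filter size =
      (PySem.List.pyRange 0 size 1).map (fun i => (PySem.List.pyRange 0 size 1).map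
        (fun j => if i = 0 ∨ i = size - 1 ∨ j = 0 ∨ j = size - 1 then (1 : Int) else 0)) := by
  unfold get_o_filter
  rw [PySem.List.foldl_append_singleton_eq_map]
  refine List.map_congr_left (fun i _ => ?_)
  rw [PySem.List.foldl_append_singleton_eq_map, List.nil_append]

-- ===== VERDICT (by name: the statement is the Claim_ definition above) =====
theorem get_o_filter_spec : Claim_equal_get_o_filter := by
  intro size _
  show get_o_filter size = get_o_filter_alt size
  rw [get_o_filter_eq_map]
  unfold get_o_filter_alt
  by_cases hpos : size > 0
  · simp only [hpos, if_pos]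
    apply List.ext_getElem
    · simp [PySem.List.length_pyRange_one]
    · intro i h1 h2
      have hi : i < size.toNat := by
        simp [PySem.List.length_pyRange_one] at h1; omega
      apply List.ext_getElem
      · simp only [List.getElem_map, List.length_map, PySem.List.length_pyRange_one,
          PySem.List.getElem_pyRange_one, List.length_replicate, List.length_set,
          List.getElem_set, List.getElem_replicate]
        split_ifs <;> simp
      · intro j h3 h4
        have hj : j < size.toNat := by
          simp [PySem.List.length_pyRange_one] at h3; omega
        simp only [List.getElem_map, PySem.List.getElem_pyRange_one, List.length_replicate,
          List.length_set, List.getElem_set, List.getElem_replicate]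
        split_ifs <;>
          (try simp only [List.getElem_set, List.getElem_replicate, List.length_replicate] at *) <;>
          omega
  · simp only [hpos, if_false]
    have h0 : size.toNat = 0 := by omega
    rw [PySem.List.pyRange_one_eq_nil (by omega), h0]
    simp
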